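-- pv_equiv track=rewrite | github.com/mashathepotato/visual-reasoning | utils/fot/maze_ops.py | path_to_segments
-- ===== SOURCE A (Python) =====
-- from typing import List, Tuple
--
-- def path_to_segments(path: List[Tuple[int, int]]) -> List[List[Tuple[int, int]]]:
--     if not path:
--         return []
--     if len(path) == 1:
--         return [[path[0]]]
--
--     segments: List[List[Tuple[int, int]]] = []
--     curr = [path[0]]
--     curr_dir = (path[1][0] - path[0][0], path[1][1] - path[0][1])
--
--     for i in range(1, len(path)):
--         step = (path[i][0] - path[i - 1][0], path[i][1] - path[i - 1][1])
--         if step != curr_dir: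
--             segments.append(curr)
--             curr = [path[i - 1], path[i]]
--             curr_dir = step
--         else:
--             curr.append(path[i])
--     segments.append(curr)
--     return segments
-- ===== SOURCE B (Python) =====
-- from typing import List, Tuple
--
-- def path_to_segments(path: List[Tuple[int, int]]) -> List[List[Tuple[int, int]]]:
--     if not path:
--         return []
--     if len(path) == 1:
--         return [[path[0]]]
--     # direction of every step, computed up front
--     dirs = [(bx - ax, by - ay) for (ax, ay), (bx, by) in zip(path, path[1:])]
--     # run-length encode the direction sequence
--     runs = []
--     cnt = 1
--     for prev, cur in zip(dirs, dirs[1:]):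
--         if cur == prev:
--             cnt += 1
--         else:
--             runs.append(cnt)
--             cnt = 1
--     runs.append(cnt)
--     # cut the path: a run of k equal steps spans k+1 points, adjacent runs share a point
--     segments = []
--     p = 0
--     for k in runs:
--         segments.append(path[p:p + k + 1])
--         p += k
--     return segments
-- ===== Notes on version B (the rewrite author's own statement) =====
-- stated objective: alternative
-- what changed: B computes the list of step directions up front, run-length-encodes that direction sequence, and then produces each segment by slicing the path at run boundaries, instead of A's single pass that grows a current segment and flushes it on a direction change.
import Mathlib
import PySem

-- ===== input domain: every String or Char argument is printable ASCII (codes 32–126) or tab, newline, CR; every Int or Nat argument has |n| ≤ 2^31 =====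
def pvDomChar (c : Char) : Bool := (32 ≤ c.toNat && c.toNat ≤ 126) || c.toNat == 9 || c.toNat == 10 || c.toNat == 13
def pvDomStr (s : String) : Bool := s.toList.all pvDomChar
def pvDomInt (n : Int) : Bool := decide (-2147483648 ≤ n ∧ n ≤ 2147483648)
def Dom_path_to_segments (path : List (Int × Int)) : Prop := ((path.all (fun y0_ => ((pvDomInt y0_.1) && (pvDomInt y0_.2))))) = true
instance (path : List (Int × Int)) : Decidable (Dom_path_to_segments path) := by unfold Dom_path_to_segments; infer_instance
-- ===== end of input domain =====

-- B re-implements the segment split as: step-direction list up front, run-length-encode it,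
-- then cut the path by slicing at run boundaries (same cost as A; a different decomposition).

-- ===== PORT A =====
-- Literal port of A: the loop indices i and i-1 always lie in range, so path[i] is ported as
-- pyGetD (exact in range).
def path_to_segments (path : List (Int × Int)) : List (List (Int × Int)) :=
  if path = [] then []
  else if path.length = 1 then [[path.headD (0, 0)]]
  else
    let f := (PySem.List.pyRange 1 (PySem.List.len path) 1).foldl
      (fun (st : List (List (Int × Int)) × List (Int × Int) × (Int × Int)) i =>
        let step := ((PySem.List.pyGetD path i (0, 0)).1 - (PySem.List.pyGetD path (i - 1) (0, 0)).1,
                     (PySem.List.pyGetD path i (0, 0)).2 - (PySem.List.pyGetD path (i - 1) (0, 0)).2)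
        if step ≠ st.2.2 then
          (st.1 ++ [st.2.1], [PySem.List.pyGetD path (i - 1) (0, 0), PySem.List.pyGetD path i (0, 0)], step)
        else (st.1, st.2.1 ++ [PySem.List.pyGetD path i (0, 0)], st.2.2))
      ([], [PySem.List.pyGetD path 0 (0, 0)],
        ((PySem.List.pyGetD path 1 (0, 0)).1 - (PySem.List.pyGetD path 0 (0, 0)).1,
         (PySem.List.pyGetD path 1 (0, 0)).2 - (PySem.List.pyGetD path 0 (0, 0)).2))
    f.1 ++ [f.2.1]

-- ===== PORT B =====
-- Literal port of Source B.  The nonnegative slice path[p:p+k+1] is ported as (drop p).take (k+1),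
-- which is exact for nonnegative bounds (both clamp past the end).
def path_to_segments_alt (path : List (Int × Int)) : List (List (Int × Int)) :=
  if path = [] then []
  else if path.length = 1 then [[path.headD (0, 0)]]
  else
    let dirs := (path.zip path.tail).map (fun ab => (ab.2.1 - ab.1.1, ab.2.2 - ab.1.2))
    let r := (dirs.zip dirs.tail).foldl
      (fun (st : List Nat × Nat) pc =>
        if pc.2 = pc.1 then (st.1, st.2 + 1) else (st.1 ++ [st.2], 1))
      ([], 1)
    let runs := r.1 ++ [r.2]
    let s := runs.foldl
      (fun (st : List (List (Int × Int)) × Nat) k =>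
        (st.1 ++ [(path.drop st.2).take (k + 1)], st.2 + k))
      ([], 0)
    s.1

-- ===== PRECONDITION & SPEC =====
def Spec_path_to_segments (path : List (Int × Int)) (out : List (List (Int × Int))) : Prop := out = path_to_segments_alt path
instance (path : List (Int × Int)) (out : List (List (Int × Int))) : Decidable (Spec_path_to_segments path out) := by unfold Spec_path_to_segments; infer_instance

-- ===== CLAIM (what is proved, stated in full; the proofs are below) =====
def Claim_equal_path_to_segments : Prop := ∀ (path : List (Int × Int)), Dom_path_to_segments path → Spec_path_to_segments path (path_to_segments path)

-- ===== LEMMAS AND PROOFS =====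

-- Common recursive specification: the segments of the path `prev :: t`, given the current
-- segment `curr` (which ends at `prev`) and the current direction `d`.
def segsFrom (curr : List (Int × Int)) (d : Int × Int) (prev : Int × Int) :
    List (Int × Int) → List (List (Int × Int))
  | [] => [curr]
  | c :: t =>
    if (c.1 - prev.1, c.2 - prev.2) = d then segsFrom (curr ++ [c]) d c t
    else curr :: segsFrom [prev, c] (c.1 - prev.1, c.2 - prev.2) c t

-- The loop body of A, expressed on a pair (previous point, current point).
def aBody (st : List (List (Int × Int)) × List (Int × Int) × (Int × Int))
    (pc : (Int × Int) × (Int × Int)) : List (List (Int × Int)) × List (Int × Int) × (Int × Int) :=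
  let step := (pc.2.1 - pc.1.1, pc.2.2 - pc.1.2)
  if step ≠ st.2.2 then (st.1 ++ [st.2.1], [pc.1, pc.2], step)
  else (st.1, st.2.1 ++ [pc.2], st.2.2)

-- The two loop bodies of B.
def rleBody (st : List Nat × Nat) (pc : (Int × Int) × (Int × Int)) : List Nat × Nat :=
  if pc.2 = pc.1 then (st.1, st.2 + 1) else (st.1 ++ [st.2], 1)

def cutBody (path : List (Int × Int)) (st : List (List (Int × Int)) × Nat) (k : Nat) :
    List (List (Int × Int)) × Nat :=
  (st.1 ++ [(path.drop st.2).take (k + 1)], st.2 + k)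

-- B-side recursive helpers: run-length encoding and cutting by run lengths.
def rleF (cnt : Nat) (d : Int × Int) : List (Int × Int) → List Nat
  | [] => [cnt]
  | e :: r => if e = d then rleF (cnt + 1) d r else cnt :: rleF 1 e r

def cutRec (s : List (Int × Int)) : List Nat → List (List (Int × Int))
  | [] => []
  | k :: ks => s.take (k + 1) :: cutRec (s.drop k) ks

-- the direction list of the path prev :: t
def dirsOf (prev : Int × Int) : List (Int × Int) → List (Int × Int)
  | [] => []
  | e :: t => (e.1 - prev.1, e.2 - prev.2) :: dirsOf e t

lemma dirsOf_eq : ∀ (t : List (Int × Int)) (prev : Int × Int),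
    ((prev :: t).zip t).map (fun ab => (ab.2.1 - ab.1.1, ab.2.2 - ab.1.2)) = dirsOf prev t := by
  intro t
  induction t with
  | nil => intro prev; simp [dirsOf]
  | cons e t ih => intro prev; simp [dirsOf, ih e]

-- A's fold over consecutive pairs computes segsFrom.
lemma aFold_eq_segsFrom : ∀ (t : List (Int × Int)) (prev : Int × Int)
    (segs : List (List (Int × Int))) (curr : List (Int × Int)) (d : Int × Int),
    ((((prev :: t).zip t).foldl aBody (segs, curr, d)).1 ++
      [(((prev :: t).zip t).foldl aBody (segs, curr, d)).2.1]) = segs ++ segsFrom curr d prev t := by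
  intro t
  induction t with
  | nil => intro prev segs curr d; simp [segsFrom]
  | cons e t ih =>
    intro prev segs curr d
    by_cases h : (e.1 - prev.1, e.2 - prev.2) = d
    · simp [aBody, segsFrom, h, ih e]
    · simp [aBody, segsFrom, h, ih e]

-- B's first fold computes the run-length encoding rleF.
lemma rleFold_eq_rleF : ∀ (rest : List (Int × Int)) (d : Int × Int) (runs : List Nat) (cnt : Nat),
    ((((d :: rest).zip rest).foldl rleBody (runs, cnt)).1 ++
      [(((d :: rest).zip rest).foldl rleBody (runs, cnt)).2]) = runs ++ rleF cnt d rest := by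
  intro rest
  induction rest with
  | nil => intro d runs cnt; simp [rleF]
  | cons e r ih =>
    intro d runs cnt
    by_cases h : e = d
    · subst h
      simp [rleBody, rleF, ih]
    · simp [rleBody, rleF, h, ih e]

-- B's second fold computes cutRec.
lemma cutFold_eq_cutRec : ∀ (runs : List Nat) (path : List (Int × Int))
    (segs : List (List (Int × Int))) (p : Nat),
    (runs.foldl (cutBody path) (segs, p)).1 = segs ++ cutRec (path.drop p) runs := by
  intro runs
  induction runs with
  | nil => intro path segs p; simp [cutRec]
  | cons k ks ih =>
    intro path segs p
    simp [cutBody, cutRec, ih path, List.drop_drop, Nat.add_comm]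

-- Cutting the path by the run-length encoding of its direction list is segsFrom.
lemma segsFrom_eq_cut : ∀ (t ys : List (Int × Int)) (prev d : Int × Int),
    segsFrom (ys ++ [prev]) d prev t =
      cutRec ((ys ++ [prev]) ++ t) (rleF ys.length d (dirsOf prev t)) := by
  intro t
  induction t with
  | nil =>
    intro ys prev d
    have h1 : (ys ++ [prev]).take (ys.length + 1) = ys ++ [prev] := by
      rw [show ys.length + 1 = (ys ++ [prev]).length by simp]
      exact List.take_length
    simp [segsFrom, dirsOf, rleF, cutRec, h1]
  | cons e t ih =>
    intro ys prev d
    by_cases h : (e.1 - prev.1, e.2 - prev.2) = d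
    · have hih := ih (ys ++ [prev]) e d
      simp only [segsFrom, dirsOf, rleF, if_pos h]
      simpa [List.append_assoc] using hih
    · have hto' : (ys ++ (prev :: e :: t)).take (ys.length + 1) = ys ++ [prev] := by
        rw [show ys ++ (prev :: e :: t) = (ys ++ [prev]) ++ (e :: t) by simp]
        rw [show ys.length + 1 = (ys ++ [prev]).length by simp]
        exact List.take_left
      have hdr' : (ys ++ (prev :: e :: t)).drop ys.length = prev :: e :: t :=
        List.drop_left
      have hih' : segsFrom [prev, e] (e.1 - prev.1, e.2 - prev.2) e t
          = cutRec (prev :: e :: t) (rleF 1 (e.1 - prev.1, e.2 - prev.2) (dirsOf e t)) := by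
        simpa using ih [prev] e (e.1 - prev.1, e.2 - prev.2)
      simp only [segsFrom, dirsOf, rleF, if_neg h, cutRec]
      simp [hto', hdr', hih']

-- Bridge: A's index loop over range(1, len(path)) is the fold of aBody over consecutive pairs.
lemma bridge (path : List (Int × Int))
    (init : List (List (Int × Int)) × List (Int × Int) × (Int × Int)) :
    (PySem.List.pyRange 1 (PySem.List.len path) 1).foldl
      (fun (st : List (List (Int × Int)) × List (Int × Int) × (Int × Int)) i =>
        let step := ((PySem.List.pyGetD path i (0, 0)).1 - (PySem.List.pyGetD path (i - 1) (0, 0)).1,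
                     (PySem.List.pyGetD path i (0, 0)).2 - (PySem.List.pyGetD path (i - 1) (0, 0)).2)
        if step ≠ st.2.2 then
          (st.1 ++ [st.2.1], [PySem.List.pyGetD path (i - 1) (0, 0), PySem.List.pyGetD path i (0, 0)], step)
        else (st.1, st.2.1 ++ [PySem.List.pyGetD path i (0, 0)], st.2.2))
      init
    = (path.zip path.tail).foldl aBody init := by
  have hb : (fun (st : List (List (Int × Int)) × List (Int × Int) × (Int × Int)) (i : Int) =>
      let step := ((PySem.List.pyGetD path i (0, 0)).1 - (PySem.List.pyGetD path (i - 1) (0, 0)).1,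
                   (PySem.List.pyGetD path i (0, 0)).2 - (PySem.List.pyGetD path (i - 1) (0, 0)).2)
      if step ≠ st.2.2 then
        (st.1 ++ [st.2.1], [PySem.List.pyGetD path (i - 1) (0, 0), PySem.List.pyGetD path i (0, 0)], step)
      else (st.1, st.2.1 ++ [PySem.List.pyGetD path i (0, 0)], st.2.2))
      = fun st i => aBody st (PySem.List.pyGetD path (i - 1) (0, 0), PySem.List.pyGetD path i (0, 0)) := rfl
  rw [hb]
  have hrange : PySem.List.pyRange 1 (PySem.List.len path) 1
      = (PySem.List.pyRange 0 (((path.zip path.tail).length : Nat) : Int) 1).map (· + 1) := by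
    apply List.ext_getElem
    · simp only [List.length_map, PySem.List.length_pyRange_one, PySem.List.len_eq,
        List.length_zip, List.length_tail]
      omega
    · intro k h1 h2
      simp only [List.getElem_map, PySem.List.getElem_pyRange_one]
      omega
  rw [hrange, List.foldl_map]
  have hcongr : ∀ (st : List (List (Int × Int)) × List (Int × Int) × (Int × Int)),
      ∀ j ∈ PySem.List.pyRange 0 (((path.zip path.tail).length : Nat) : Int) 1,
      aBody st (PySem.List.pyGetD path (j + 1 - 1) (0, 0), PySem.List.pyGetD path (j + 1) (0, 0))
        = aBody st (PySem.List.pyGetD (path.zip path.tail) j ((0, 0), (0, 0))) := by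
    intro st j hj
    rw [PySem.List.mem_pyRange_one] at hj
    obtain ⟨k, rfl⟩ : ∃ k : Nat, j = (k : Int) := ⟨j.toNat, by omega⟩
    have hklt : k < (path.zip path.tail).length := by exact_mod_cast hj.2
    have hkp : k + 1 < path.length := by
      simp only [List.length_zip, List.length_tail] at hklt; omega
    have e1 : PySem.List.pyGetD path ((k : Int) + 1 - 1) (0, 0) = path.getD k (0, 0) := by
      rw [show (k : Int) + 1 - 1 = ((k : Nat) : Int) by omega, PySem.List.pyGetD_natCast]
    have e2 : PySem.List.pyGetD path ((k : Int) + 1) (0, 0) = path.getD (k + 1) (0, 0) := by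
      rw [show (k : Int) + 1 = (((k + 1 : Nat)) : Int) by omega, PySem.List.pyGetD_natCast]
    have e3 : PySem.List.pyGetD (path.zip path.tail) (k : Int) ((0, 0), (0, 0))
        = (path.getD k (0, 0), path.getD (k + 1) (0, 0)) := by
      rw [PySem.List.pyGetD_natCast, List.getD_eq_getElem _ _ hklt]
      simp only [List.getElem_zip, List.getElem_tail]
      rw [List.getD_eq_getElem _ _ (show k < path.length by omega),
        List.getD_eq_getElem _ _ hkp]
    rw [e1, e2, e3]
  exact (PySem.List.foldl_congr_mem _
      (fun st j => aBody st (PySem.List.pyGetD path (j + 1 - 1) (0, 0), PySem.List.pyGetD path (j + 1) (0, 0)))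
      (fun st j => aBody st (PySem.List.pyGetD (path.zip path.tail) j ((0, 0), (0, 0))))
      init hcongr).trans
    (PySem.List.foldl_pyRange_zero_pyGetD' (path.zip path.tail) ((0, 0), (0, 0)) aBody init)

-- A on a path of length ≥ 2 computes segsFrom.
lemma aMain (p c : Int × Int) (t : List (Int × Int)) :
    path_to_segments (p :: c :: t) = segsFrom [p, c] (c.1 - p.1, c.2 - p.2) c t := by
  have hne : (p :: c :: t) ≠ ([] : List (Int × Int)) := by simp
  have hlen1 : (p :: c :: t).length ≠ 1 := by simp
  have h0 : PySem.List.pyGetD (p :: c :: t) 0 (0, 0) = p := by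
    simp
  have h1 : PySem.List.pyGetD (p :: c :: t) 1 (0, 0) = c := by
    simpa using PySem.List.pyGetD_natCast (p :: c :: t) 1 (0, 0)
  rw [path_to_segments.eq_def, if_neg hne, if_neg hlen1, bridge, h0, h1]
  have hzip : (p :: c :: t).zip (p :: c :: t).tail = (p, c) :: ((c :: t).zip t) := rfl
  rw [hzip, List.foldl_cons]
  have hstep : aBody ([], [p], (c.1 - p.1, c.2 - p.2)) (p, c)
      = ([], [p, c], (c.1 - p.1, c.2 - p.2)) := by
    simp [aBody]
  rw [hstep]
  simpa using aFold_eq_segsFrom t c [] [p, c] (c.1 - p.1, c.2 - p.2)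

-- B on a path of length ≥ 2 cuts the path by the RLE of its direction list.
lemma bMain (p c : Int × Int) (t : List (Int × Int)) :
    path_to_segments_alt (p :: c :: t)
      = cutRec (p :: c :: t) (rleF 1 (c.1 - p.1, c.2 - p.2) (dirsOf c t)) := by
  have hne : (p :: c :: t) ≠ ([] : List (Int × Int)) := by simp
  have hlen1 : (p :: c :: t).length ≠ 1 := by simp
  rw [path_to_segments_alt.eq_def, if_neg hne, if_neg hlen1]
  have hdirs : ((p :: c :: t).zip (p :: c :: t).tail).map (fun ab => (ab.2.1 - ab.1.1, ab.2.2 - ab.1.2))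
      = (c.1 - p.1, c.2 - p.2) :: dirsOf c t := by
    rw [show (p :: c :: t).zip (p :: c :: t).tail = (p, c) :: ((c :: t).zip t) from rfl]
    rw [List.map_cons, dirsOf_eq]
  rw [hdirs]
  show ((((((c.1 - p.1, c.2 - p.2) :: dirsOf c t).zip (((c.1 - p.1, c.2 - p.2) :: dirsOf c t)).tail).foldl
        rleBody ([], 1)).1 ++
      [(((((c.1 - p.1, c.2 - p.2) :: dirsOf c t)).zip (((c.1 - p.1, c.2 - p.2) :: dirsOf c t)).tail).foldl
        rleBody ([], 1)).2]).foldl (cutBody (p :: c :: t)) ([], 0)).1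
    = cutRec (p :: c :: t) (rleF 1 (c.1 - p.1, c.2 - p.2) (dirsOf c t))
  rw [show ((c.1 - p.1, c.2 - p.2) :: dirsOf c t).tail = dirsOf c t from rfl]
  rw [cutFold_eq_cutRec, rleFold_eq_rleF]
  simp

-- ===== VERDICT (by name: the statement is the Claim_ definition above) =====
theorem path_to_segments_spec : Claim_equal_path_to_segments := by
  intro path _hdom
  unfold Spec_path_to_segments
  match path with
  | [] => rfl
  | [x] => rfl
  | p :: c :: t =>
    rw [aMain, bMain]
    simpa using segsFrom_eq_cut t [p] c (c.1 - p.1, c.2 - p.2)
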